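-- pv_equiv track=rewrite | github.com/adnathanail/aoc | 2023/day13/part1.py | get_horizontal_mirror_index
-- ===== SOURCE A (Python) =====
-- def get_horizontal_mirror_index(grid):
--     for split_point in range(1, len(grid)):
--         first_half = grid[:split_point]
--         second_half = grid[split_point:]
--         if len(first_half) > len(second_half):
--             first_half = first_half[len(first_half) - len(second_half) :]
--         elif len(second_half) > len(first_half):
--             second_half = second_half[: len(first_half)]
--         if first_half == second_half[::-1]:
--             return split_point
-- ===== SOURCE B (Python) =====
-- def get_horizontal_mirror_index(grid):
--     # One pass maintaining the already-seen prefix in reversed order; a split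
--     # mirrors iff that reversed prefix and the remaining suffix agree on their
--     # common prefix (zip truncates to the shorter side), so no per-split
--     # slicing, trimming or reversal is needed.
--     rev = []
--     rest = list(grid)
--     i = 0
--     while rest:
--         if rev and all(a == b for a, b in zip(rev, rest)):
--             return i
--         rev = [rest[0]] + rev
--         rest = rest[1:]
--         i += 1
--     return None
-- ===== Notes on version B (the rewrite author's own statement) =====
-- stated objective: alternative
-- what changed: Instead of slicing out both halves, trimming the longer one and reversing the second half at every split point, B makes one pass that incrementally maintains the already-seen prefix in reversed order and tests each split by a single zip comparison of that reversed prefix against the remaining suffix (zip truncates, so no trimming or reversal per split).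
import Mathlib
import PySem

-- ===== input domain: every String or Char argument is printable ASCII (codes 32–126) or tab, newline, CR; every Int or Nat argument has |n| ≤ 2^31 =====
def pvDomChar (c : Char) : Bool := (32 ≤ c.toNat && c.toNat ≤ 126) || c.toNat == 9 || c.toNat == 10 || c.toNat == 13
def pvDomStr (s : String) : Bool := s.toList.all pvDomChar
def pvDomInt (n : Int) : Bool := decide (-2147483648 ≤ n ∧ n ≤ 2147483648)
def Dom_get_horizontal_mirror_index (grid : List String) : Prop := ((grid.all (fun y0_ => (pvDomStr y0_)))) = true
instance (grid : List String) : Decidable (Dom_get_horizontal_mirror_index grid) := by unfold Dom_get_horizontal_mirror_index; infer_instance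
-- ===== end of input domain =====

-- B changes the decomposition (one pass keeping the reversed prefix, zip comparison per split)
-- rather than slicing/trimming/reversing the two halves at each split; same results, similar cost.

-- ===== PORT A =====
-- body of A's loop for one split_point (grid[:sp], grid[sp:], trim the longer half, compare
-- first_half == second_half[::-1]; [::-1] is List.reverse by PySem.List.slice?_none_none_neg_one)
def pvCheckA (grid : List String) (sp : Int) : Bool :=
  let first_half := PySem.List.slice grid none (some sp)
  let second_half := PySem.List.slice grid (some sp) none
  let first_half' :=
    if first_half.length > second_half.length then
      PySem.List.slice first_half (some ((first_half.length : Int) - (second_half.length : Int))) none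
    else first_half
  let second_half' :=
    if second_half.length > first_half.length then
      PySem.List.slice second_half none (some (first_half.length : Int))
    else second_half
  first_half' == second_half'.reverse

-- 'for split_point in range(1, len(grid)): … return split_point' with early return
def pvLoopA (grid : List String) : List Int → Option Int
  | [] => none
  | sp :: rest => if pvCheckA grid sp then some sp else pvLoopA grid rest

def get_horizontal_mirror_index (grid : List String) : Option Int :=
  pvLoopA grid (PySem.List.pyRange 1 (grid.length : Int) 1)

-- ===== PORT B =====
-- all(a == b for a, b in zip(rev, rest))
def pvZipAllEq (xs ys : List String) : Bool :=
  (List.zip xs ys).all fun p => p.1 == p.2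

-- the while loop of Source B: rev is the reversed already-seen prefix, rest the suffix, i the split
def pvLoopB : List String → List String → Int → Option Int
  | _, [], _ => none
  | rev, r :: rs, i =>
    if !rev.isEmpty && pvZipAllEq rev (r :: rs) then some i
    else pvLoopB (r :: rev) rs (i + 1)

def get_horizontal_mirror_index_alt (grid : List String) : Option Int :=
  pvLoopB [] grid 0

-- ===== PRECONDITION & SPEC =====
def Spec_get_horizontal_mirror_index (grid : List String) (out : Option Int) : Prop := out = get_horizontal_mirror_index_alt grid
instance (grid : List String) (out : Option Int) : Decidable (Spec_get_horizontal_mirror_index grid out) := by unfold Spec_get_horizontal_mirror_index; infer_instance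

-- ===== CLAIM (what is proved, stated in full; the proofs are below) =====
def Claim_equal_get_horizontal_mirror_index : Prop := ∀ (grid : List String), Dom_get_horizontal_mirror_index grid → Spec_get_horizontal_mirror_index grid (get_horizontal_mirror_index grid)

-- ===== LEMMAS AND PROOFS =====

lemma pvZipAllEq_iff (u v : List String) :
    pvZipAllEq u v = true ↔ u.take v.length = v.take u.length := by
  induction u generalizing v with
  | nil => simp [pvZipAllEq]
  | cons a u ih =>
    cases v with
    | nil => simp [pvZipAllEq]
    | cons b v =>
      simp [pvZipAllEq, List.all_cons, ← ih]

lemma pvHalves_iff (xs ys : List String) :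
    ((if xs.length > ys.length then xs.drop (xs.length - ys.length) else xs) =
      (if ys.length > xs.length then ys.take xs.length else ys).reverse)
    ↔ xs.reverse.take ys.length = ys.take xs.reverse.length := by
  simp only [List.length_reverse]
  rcases Nat.lt_trichotomy ys.length xs.length with h | h | h
  · rw [if_pos h, if_neg (by omega)]
    rw [List.take_reverse, List.take_of_length_le (by omega : ys.length ≤ xs.length)]
    exact List.reverse_eq_iff.symm
  · rw [if_neg (by omega), if_neg (by omega)]
    have h1 : xs.reverse.take ys.length = xs.reverse :=
      List.take_of_length_le (by simpa using h.ge)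
    have h2 : ys.take xs.length = ys :=
      List.take_of_length_le (by omega)
    rw [h1, h2]
    exact List.reverse_eq_iff.symm
  · rw [if_neg (by omega), if_pos h]
    have h1 : xs.reverse.take ys.length = xs.reverse :=
      List.take_of_length_le (by simpa using le_of_lt h)
    rw [h1]
    exact List.reverse_eq_iff.symm

lemma pvCheck_core (xs ys : List String) :
    ((if xs.length > ys.length then xs.drop (xs.length - ys.length) else xs) ==
      (if ys.length > xs.length then ys.take xs.length else ys).reverse)
    = pvZipAllEq xs.reverse ys := by
  rw [Bool.eq_iff_iff, beq_iff_eq, pvZipAllEq_iff]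
  exact pvHalves_iff xs ys

lemma pvCheckA_eq (grid : List String) (j : Nat) :
    pvCheckA grid (j : Int) = pvZipAllEq (grid.take j).reverse (grid.drop j) := by
  unfold pvCheckA
  simp only [PySem.List.slice_to_natCast, PySem.List.slice_from_natCast]
  have hfix :
      (if (grid.take j).length > (grid.drop j).length then
        PySem.List.slice (grid.take j)
          (some (((grid.take j).length : Int) - ((grid.drop j).length : Int))) none
      else grid.take j)
      = (if (grid.take j).length > (grid.drop j).length then
          (grid.take j).drop ((grid.take j).length - (grid.drop j).length)
        else grid.take j) := by
    split_ifs with h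
    · rw [PySem.List.slice_some_none]
      congr 1
      simp only [PySem.List.clampIdx]
      split_ifs <;> omega
    · rfl
  rw [hfix, pvCheck_core]

lemma pvLoop_eq (grid : List String) :
    ∀ (rest : List String) (j : Nat), 1 ≤ j → rest = grid.drop j →
      pvLoopB (grid.take j).reverse rest (j : Int) =
        pvLoopA grid (PySem.List.pyRange (j : Int) (grid.length : Int) 1) := by
  intro rest
  induction rest with
  | nil =>
    intro j hj hdrop
    have hlen : grid.length ≤ j := by
      have := congrArg List.length hdrop
      simp at this
      omega
    rw [PySem.List.pyRange_one_eq_nil (by exact_mod_cast hlen)]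
    simp [pvLoopB, pvLoopA]
  | cons r rs ih =>
    intro j hj hdrop
    have hlt : j < grid.length := by
      have := congrArg List.length hdrop
      simp at this
      omega
    have hrev_ne : ((grid.take j).reverse).isEmpty = false := by
      have hne : (grid.take j).length ≠ 0 := by
        rw [List.length_take]
        omega
      simp only [List.isEmpty_eq_false_iff, ne_eq, List.reverse_eq_nil_iff]
      intro he
      exact hne (by rw [he]; rfl)
    rw [PySem.List.pyRange_one_cons (by exact_mod_cast hlt)]
    rw [pvLoopB, pvLoopA]
    simp only [hrev_ne, Bool.not_false, Bool.true_and]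
    rw [pvCheckA_eq, ← hdrop]
    by_cases hc : pvZipAllEq (grid.take j).reverse (r :: rs) = true
    · simp [hc]
    · rw [if_neg (by simpa using hc), if_neg (by simpa using hc)]
      have hr : grid[j]? = some r := by
        rw [← List.head?_drop, ← hdrop]
        rfl
      have htake : (grid.take (j + 1)).reverse = r :: (grid.take j).reverse := by
        rw [List.take_add_one, hr]
        simp
      have hdrop2 : rs = grid.drop (j + 1) := by
        have h2 : grid.drop (j + 1) = (grid.drop j).drop 1 := by
          rw [List.drop_drop]
        rw [h2, ← hdrop]
        rfl
      have hmain := ih (j + 1) (by omega) hdrop2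
      rw [htake] at hmain
      have hc1 : ((j : Int) + 1) = ((j + 1 : Nat) : Int) := by push_cast; ring
      rw [hc1]
      exact hmain

-- ===== VERDICT (by name: the statement is the Claim_ definition above) =====
theorem get_horizontal_mirror_index_spec : Claim_equal_get_horizontal_mirror_index := by
  intro grid _
  unfold Spec_get_horizontal_mirror_index get_horizontal_mirror_index get_horizontal_mirror_index_alt
  cases grid with
  | nil => simp [pvLoopB, pvLoopA, PySem.List.pyRange_one_eq_nil]
  | cons g gs =>
    have h1 : pvLoopB [] (g :: gs) 0 = pvLoopB [g] gs 1 := by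
      simp [pvLoopB]
    rw [h1]
    have := pvLoop_eq (g :: gs) gs 1 (le_refl 1) (by simp)
    simpa using this.symm
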